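-- pv_equiv track=rewrite | github.com/gridhead/pignus-framework-vulnerability-detector | fwvulcode_multi.py | _get_implied_apps
-- ===== SOURCE A (Python) =====
-- def _get_implied_apps(detected_apps, apps1):
--     def __get_implied_apps(detect, apps):
--         _implied_apps = set()
--         for detected in detect:
--             try:
--                 _implied_apps.update(set(apps[detected]['implies']))
--             except KeyError:
--                 pass
--         return _implied_apps
--     implied_apps = __get_implied_apps(detected_apps, apps1)
--     all_implied_apps = set()
--     while not all_implied_apps.issuperset(implied_apps):
--         all_implied_apps.update(implied_apps)
--         implied_apps = __get_implied_apps(all_implied_apps, apps1)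
--     return all_implied_apps
-- ===== SOURCE B (Python) =====
-- def _get_implied_apps(detected_apps, apps1):
--     out = set()
--     frontier = list(detected_apps)
--     while frontier:
--         new = []
--         for d in frontier:
--             entry = apps1.get(d)
--             if entry is None:
--                 continue
--             for x in entry.get('implies', ()):
--                 if x not in out:
--                     out.add(x)
--                     new.append(x)
--         frontier = new
--     return out
-- ===== Notes on version B (the rewrite author's own statement) =====
-- stated objective: alternative
-- what changed: A recomputes the implied-set of the ENTIRE accumulated set on every fixpoint iteration until nothing new appears; B runs a BFS worklist that looks up each newly discovered app once per round and extends the result incrementally.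
import Mathlib
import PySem

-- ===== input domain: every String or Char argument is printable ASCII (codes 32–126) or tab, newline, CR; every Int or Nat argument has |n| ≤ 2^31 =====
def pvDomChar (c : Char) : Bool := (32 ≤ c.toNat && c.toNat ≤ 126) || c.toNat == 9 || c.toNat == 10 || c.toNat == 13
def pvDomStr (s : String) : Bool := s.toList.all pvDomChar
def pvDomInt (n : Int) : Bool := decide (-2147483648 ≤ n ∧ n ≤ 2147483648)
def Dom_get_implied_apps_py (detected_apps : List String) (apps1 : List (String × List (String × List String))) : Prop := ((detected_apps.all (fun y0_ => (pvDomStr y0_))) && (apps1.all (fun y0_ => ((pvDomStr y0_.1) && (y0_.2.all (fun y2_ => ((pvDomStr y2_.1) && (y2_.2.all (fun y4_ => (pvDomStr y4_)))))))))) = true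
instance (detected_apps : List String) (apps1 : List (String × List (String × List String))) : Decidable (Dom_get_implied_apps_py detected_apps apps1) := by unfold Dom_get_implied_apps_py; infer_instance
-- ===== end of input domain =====

-- B replaces A's repeated full-set re-scan to a fixpoint by a BFS worklist that expands only the
-- newly discovered apps of each round; same returned set (not measurably faster on the timed inputs).
-- Both while-loops are ported with a fuel bound (total length of all 'implies' lists + slack),
-- which is proved sufficient inside the equivalence proof; this only makes the loops total.

-- ===== PORT A =====
-- apps[detected]['implies'] with the try/except KeyError: none at either lookup level = skipped
def pvLookupImpliesA (apps : List (String × List (String × List String))) (d : String) : Option (List String) :=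
  match (PySem.Dict.mk apps).get? d with
  | none => none
  | some info => (PySem.Dict.mk info).get? "implies"

-- inner helper __get_implied_apps: union of set(apps[d]['implies']) over d in detect
def pvGetImplied (detect : List String) (apps : List (String × List (String × List String))) : PySem.Set String :=
  detect.foldl (fun s d =>
    match pvLookupImpliesA apps d with
    | some l => PySem.Set.update s (PySem.Set.ofList l)
    | none => s) PySem.Set.empty

-- the while loop: while not all.issuperset(implied): all.update(implied); implied = f(all)
def pvLoopA (apps : List (String × List (String × List String))) :
    Nat → PySem.Set String → PySem.Set String → List String
  | 0, all, _ => all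
  | n+1, all, imp =>
    if PySem.Set.issuperset all imp then all
    else
      let all' := PySem.Set.update all imp
      pvLoopA apps n all' (pvGetImplied all' apps)

def get_implied_apps_py (detected_apps : List String) (apps1 : List (String × List (String × List String))) : List String :=
  pvLoopA apps1 ((apps1.flatMap (fun p => p.2.flatMap (fun q => q.2))).length + 1)
    PySem.Set.empty (pvGetImplied detected_apps apps1)

-- ===== PORT B =====
-- for x in lst: if x not in out: out.add(x); new.append(x)
def pvPush (out : PySem.Set String) (new : List String) (xs : List String) :
    PySem.Set String × List String :=
  xs.foldl (fun st x =>
    if PySem.Set.contains st.1 x then st else (PySem.Set.add st.1 x, st.2 ++ [x])) (out, new)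

-- one round over the frontier: entry = apps1.get(d); entry.get('implies', [])
def pvRound (apps : List (String × List (String × List String)))
    (out : PySem.Set String) (fr : List String) : PySem.Set String × List String :=
  fr.foldl (fun st d =>
    match (PySem.Dict.mk apps).get? d with
    | none => st
    | some entry => pvPush st.1 st.2 ((PySem.Dict.mk entry).getD "implies" [])) (out, [])

-- while frontier: ...
def pvLoopB (apps : List (String × List (String × List String))) :
    Nat → PySem.Set String → List String → List String
  | 0, out, _ => out
  | n+1, out, fr =>
    if fr = [] then out
    else
      let r := pvRound apps out fr
      pvLoopB apps n r.1 r.2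

def get_implied_apps_py_alt (detected_apps : List String) (apps1 : List (String × List (String × List String))) : List String :=
  pvLoopB apps1 ((apps1.flatMap (fun p => p.2.flatMap (fun q => q.2))).length + 2)
    PySem.Set.empty detected_apps

-- ===== PRECONDITION & SPEC =====
def Spec_get_implied_apps_py (detected_apps : List String) (apps1 : List (String × List (String × List String))) (out : List String) : Prop := out = get_implied_apps_py_alt detected_apps apps1
instance (detected_apps : List String) (apps1 : List (String × List (String × List String))) (out : List String) : Decidable (Spec_get_implied_apps_py detected_apps apps1 out) := by unfold Spec_get_implied_apps_py; infer_instance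

-- ===== CLAIM (what is proved, stated in full; the proofs are below) =====
def Claim_equal_get_implied_apps_py : Prop := ∀ (detected_apps : List String) (apps1 : List (String × List (String × List String))), Dom_get_implied_apps_py detected_apps apps1 → Spec_get_implied_apps_py detected_apps apps1 (get_implied_apps_py detected_apps apps1)

-- ===== LEMMAS AND PROOFS =====

-- the 'implies' list of d (empty when any lookup raises KeyError in A / defaults in B)
def pvI (apps : List (String × List (String × List String))) (d : String) : List String :=
  (pvLookupImpliesA apps d).getD []

-- the universe of apps that can ever be implied
def pvU (apps : List (String × List (String × List String))) : List String :=
  apps.flatMap (fun p => p.2.flatMap (fun q => q.2))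

-- one abstract round: union the implies-lists of L into s, in order
def pvRoundU (apps : List (String × List (String × List String)))
    (s : PySem.Set String) (L : List String) : PySem.Set String :=
  L.foldl (fun s d => PySem.Set.update s (pvI apps d)) s

lemma pv_update_ofList (s : PySem.Set String) (l : List String) :
    PySem.Set.update s (PySem.Set.ofList l) = PySem.Set.update s l := by
  rw [PySem.Set.update_eq_append_filter, PySem.Set.update_eq_append_filter,
    PySem.Set.ofList_ofList]

lemma pv_update_of_subset {s : PySem.Set String} {l : List String}
    (h : ∀ x ∈ l, x ∈ s) : PySem.Set.update s l = s := by
  rw [PySem.Set.update_eq_append_filter]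
  have hfil : List.filter (fun y => !s.contains y) (PySem.Set.ofList l) = [] := by
    rw [List.filter_eq_nil_iff]
    intro a ha
    simp only [PySem.Set.mem_ofList] at ha
    simpa using h a ha
  rw [hfil, List.append_nil]

lemma pvGetImplied_eq (apps : List (String × List (String × List String))) (detect : List String) :
    ∀ s : PySem.Set String,
      detect.foldl (fun s d =>
        match pvLookupImpliesA apps d with
        | some l => PySem.Set.update s (PySem.Set.ofList l)
        | none => s) s = pvRoundU apps s detect := by
  induction detect with
  | nil => intro s; rfl
  | cons d t ih =>
    intro s
    have hstep : (match pvLookupImpliesA apps d with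
        | some l => PySem.Set.update s (PySem.Set.ofList l)
        | none => s) = PySem.Set.update s (pvI apps d) := by
      cases h : pvLookupImpliesA apps d with
      | none => simp [pvI, h, PySem.Set.update_nil]
      | some l => simp [pvI, h, pv_update_ofList]
    simp only [List.foldl_cons]
    rw [hstep]
    exact ih _

lemma pvGetImplied_eq' (apps : List (String × List (String × List String))) (detect : List String) :
    pvGetImplied detect apps = pvRoundU apps PySem.Set.empty detect :=
  pvGetImplied_eq apps detect PySem.Set.empty

lemma pvRoundU_eq_update (apps : List (String × List (String × List String))) (L : List String) :
    ∀ s, pvRoundU apps s L = PySem.Set.update s (L.flatMap (pvI apps)) := by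
  induction L with
  | nil => intro s; simp [pvRoundU, PySem.Set.update_nil]
  | cons d t ih =>
    intro s
    rw [List.flatMap_cons, PySem.Set.update_append, ← ih]
    rfl

lemma pv_mem_roundU (apps : List (String × List (String × List String)))
    (s : PySem.Set String) (L : List String) (x : String) :
    x ∈ pvRoundU apps s L ↔ x ∈ s ∨ ∃ d ∈ L, x ∈ pvI apps d := by
  rw [pvRoundU_eq_update, PySem.Set.mem_update, List.mem_flatMap]

lemma pvRoundU_absorb (apps : List (String × List (String × List String)))
    {s : PySem.Set String} {L : List String}
    (h : ∀ d ∈ L, ∀ x ∈ pvI apps d, x ∈ s) : pvRoundU apps s L = s := by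
  induction L with
  | nil => rfl
  | cons d t ih =>
    simp only [pvRoundU, List.foldl_cons]
    rw [pv_update_of_subset (h d (by simp))]
    exact ih (fun d' hd' => h d' (List.mem_cons_of_mem _ hd'))

lemma pvRoundU_prefix (apps : List (String × List (String × List String)))
    (s : PySem.Set String) (L : List String) :
    pvRoundU apps s L = s ++ (pvRoundU apps s L).drop s.length := by
  rw [pvRoundU_eq_update, PySem.Set.update_eq_append_filter, List.drop_left]

lemma pvRoundU_append (apps : List (String × List (String × List String)))
    (s : PySem.Set String) (L M : List String) :
    pvRoundU apps s (L ++ M) = pvRoundU apps (pvRoundU apps s L) M := by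
  simp [pvRoundU, List.foldl_append]

lemma pv_length_le (apps : List (String × List (String × List String)))
    {s : List String} (hnd : s.Nodup) (hsub : ∀ x ∈ s, x ∈ pvU apps) :
    s.length ≤ (pvU apps).length :=
  (hnd.subperm hsub).length_le

lemma pvI_subset_U (apps : List (String × List (String × List String)))
    {d x : String} (hx : x ∈ pvI apps d) : x ∈ pvU apps := by
  unfold pvI at hx
  cases h1 : pvLookupImpliesA apps d with
  | none => rw [h1] at hx; simp at hx
  | some l =>
    rw [h1] at hx
    simp only [Option.getD_some] at hx
    unfold pvLookupImpliesA at h1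
    cases h2 : (PySem.Dict.mk apps).get? d with
    | none => rw [h2] at h1; simp at h1
    | some info =>
      rw [h2] at h1
      simp only at h1
      have hm1 : (d, info) ∈ apps := PySem.Dict.mem_items_of_get?_eq_some _ h2
      have hm2 : ("implies", l) ∈ info := PySem.Dict.mem_items_of_get?_eq_some _ h1
      unfold pvU
      exact List.mem_flatMap.2 ⟨(d, info), hm1, List.mem_flatMap.2 ⟨("implies", l), hm2, hx⟩⟩

lemma pv_drop_chain {s s1 r : List String} (h : s1 = s ++ s1.drop s.length) :
    List.drop s.length (s1 ++ r) = s1.drop s.length ++ r := by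
  conv_lhs => rw [h]
  rw [List.append_assoc, List.drop_left]

lemma pvPush_spec (xs : List String) :
    ∀ (s : PySem.Set String) (n : List String),
      pvPush s n xs = (PySem.Set.update s xs, n ++ (PySem.Set.update s xs).drop s.length) := by
  induction xs with
  | nil => intro s n; simp [pvPush, PySem.Set.update_nil]
  | cons x t ih =>
    intro s n
    by_cases hx : x ∈ s
    · have hc : PySem.Set.contains s x = true := (PySem.Set.contains_iff s x).2 hx
      have hu : PySem.Set.update s (x :: t) = PySem.Set.update s t := by
        rw [PySem.Set.update_cons, PySem.Set.add_of_mem hx]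
      have hred : pvPush s n (x :: t) = pvPush s n t := by
        simp [pvPush, hx]
      rw [hred, ih, hu]
    · have hc : PySem.Set.contains s x = false := by
        rw [Bool.eq_false_iff]; intro h; exact hx ((PySem.Set.contains_iff s x).1 h)
      have hadd : PySem.Set.add s x = s ++ [x] := PySem.Set.add_of_not_mem hx
      have hu : PySem.Set.update s (x :: t) = PySem.Set.update (s ++ [x]) t := by
        rw [PySem.Set.update_cons, hadd]
      have hred : pvPush s n (x :: t) = pvPush (s ++ [x]) (n ++ [x]) t := by
        simp [pvPush, hx, hadd]
      rw [hred, ih, hu]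
      have hsplit : PySem.Set.update (s ++ [x]) t
          = (s ++ [x]) ++ (PySem.Set.update (s ++ [x]) t).drop (s ++ [x]).length := by
        rw [PySem.Set.update_eq_append_filter, List.drop_left]
      have hpre' : (s ++ [x]) = s ++ (s ++ [x]).drop s.length := by
        rw [List.drop_left]
      have key : List.drop s.length (PySem.Set.update (s ++ [x]) t)
          = List.drop s.length (s ++ [x])
            ++ List.drop (s ++ [x]).length (PySem.Set.update (s ++ [x]) t) := by
        conv_lhs => rw [hsplit]
        exact pv_drop_chain hpre'
      rw [Prod.mk.injEq]
      refine ⟨rfl, ?_⟩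
      rw [key, show List.drop s.length (s ++ [x]) = [x] from List.drop_left, List.append_assoc]

lemma pvRound_spec (apps : List (String × List (String × List String))) (fr : List String) :
    ∀ (s : PySem.Set String) (n : List String),
      fr.foldl (fun st d =>
        match (PySem.Dict.mk apps).get? d with
        | none => st
        | some entry => pvPush st.1 st.2 ((PySem.Dict.mk entry).getD "implies" [])) (s, n)
      = (pvRoundU apps s fr, n ++ (pvRoundU apps s fr).drop s.length) := by
  induction fr with
  | nil => intro s n; simp [pvRoundU]
  | cons d t ih =>
    intro s n
    have hstep : (match (PySem.Dict.mk apps).get? d with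
        | none => ((s, n) : PySem.Set String × List String)
        | some entry => pvPush s n ((PySem.Dict.mk entry).getD "implies" []))
        = (PySem.Set.update s (pvI apps d),
           n ++ (PySem.Set.update s (pvI apps d)).drop s.length) := by
      cases h : (PySem.Dict.mk apps).get? d with
      | none =>
        have hI : pvI apps d = [] := by simp [pvI, pvLookupImpliesA, h]
        show ((s, n) : PySem.Set String × List String) = _
        rw [hI, PySem.Set.update_nil]
        simp
      | some entry =>
        have hlist : (PySem.Dict.mk entry).getD "implies" [] = pvI apps d := by
          simp [pvI, pvLookupImpliesA, h, PySem.Dict.getD_eq_get?_getD]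
        show pvPush s n ((PySem.Dict.mk entry).getD "implies" []) = _
        rw [hlist, pvPush_spec]
    simp only [List.foldl_cons]
    rw [hstep, ih]
    have h1 : pvRoundU apps s (d :: t) = pvRoundU apps (PySem.Set.update s (pvI apps d)) t := by
      simp [pvRoundU]
    rw [h1]
    have hpre : PySem.Set.update s (pvI apps d)
        = s ++ (PySem.Set.update s (pvI apps d)).drop s.length := by
      rw [PySem.Set.update_eq_append_filter, List.drop_left]
    have hpre2 : pvRoundU apps (PySem.Set.update s (pvI apps d)) t
        = PySem.Set.update s (pvI apps d)
          ++ (pvRoundU apps (PySem.Set.update s (pvI apps d)) t).drop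
              (PySem.Set.update s (pvI apps d)).length :=
      pvRoundU_prefix apps _ t
    have key : List.drop s.length (pvRoundU apps (PySem.Set.update s (pvI apps d)) t)
        = List.drop s.length (PySem.Set.update s (pvI apps d))
          ++ List.drop (PySem.Set.update s (pvI apps d)).length
              (pvRoundU apps (PySem.Set.update s (pvI apps d)) t) := by
      conv_lhs => rw [hpre2]
      exact pv_drop_chain hpre
    rw [Prod.mk.injEq]
    refine ⟨rfl, ?_⟩
    rw [key, List.append_assoc]

lemma pvLoopB_fix (apps : List (String × List (String × List String)))
    {all : PySem.Set String} {fr : List String}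
    (hfix : pvRoundU apps all fr = all) :
    ∀ m, pvLoopB apps m all fr = all := by
  intro m
  cases m with
  | zero => rfl
  | succ m' =>
    by_cases hfr : fr = []
    · simp [pvLoopB, hfr]
    · simp only [pvLoopB, hfr, if_false]
      have hr : pvRound apps all fr = (all, []) := by
        unfold pvRound
        rw [pvRound_spec, hfix]
        simp
      rw [hr]
      cases m' with
      | zero => rfl
      | succ _ => simp [pvLoopB]

lemma pvMain (apps : List (String × List (String × List String))) :
    ∀ (fuelA fuelB : Nat) (all imp : PySem.Set String) (fr : List String),
      all.Nodup →
      (∀ x ∈ all, x ∈ pvU apps) →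
      PySem.Set.update all imp = pvRoundU apps all fr →
      (∀ d ∈ all, ∀ x ∈ pvI apps d, x ∈ PySem.Set.update all imp) →
      (pvU apps).length < fuelA + all.length →
      (pvU apps).length < fuelB + all.length →
      pvLoopA apps fuelA all imp = pvLoopB apps fuelB all fr := by
  intro fuelA
  induction fuelA with
  | zero =>
    intro fuelB all imp fr hnd hsub _ _ hfa _
    exact absurd (pv_length_le apps hnd hsub) (by omega)
  | succ n ih =>
    intro fuelB all imp fr hnd hsub h1 h3 hfa hfb
    by_cases hsup : PySem.Set.issuperset all imp = true
    · -- A stops: implied ⊆ all, nothing changes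
      have himp : ∀ x ∈ imp, x ∈ all := (PySem.Set.issuperset_iff all imp).1 hsup
      have hupd : PySem.Set.update all imp = all := pv_update_of_subset himp
      have hfix : pvRoundU apps all fr = all := by rw [← h1, hupd]
      rw [show pvLoopA apps (n+1) all imp = all by simp [pvLoopA, hsup]]
      exact (pvLoopB_fix apps hfix fuelB).symm
    · -- A continues: some x ∈ imp, x ∉ all
      have hx : ∃ x ∈ imp, x ∉ all := by
        by_contra hcon
        push_neg at hcon
        exact hsup ((PySem.Set.issuperset_iff all imp).2 hcon)
      obtain ⟨x, hxi, hxa⟩ := hx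
      set all' := PySem.Set.update all imp with hall'
      have h1' : all' = pvRoundU apps all fr := h1
      set new := all'.drop all.length with hnew
      have hsplit : all' = all ++ new := by
        rw [hnew, hall', PySem.Set.update_eq_append_filter, List.drop_left]
      have hxall' : x ∈ all' := by
        rw [hall', PySem.Set.mem_update]; right; exact hxi
      have hnewne : new ≠ [] := by
        intro hcon
        rw [hcon, List.append_nil] at hsplit
        rw [hsplit] at hxall'
        exact hxa hxall'
      have hfrne : fr ≠ [] := by
        intro hcon
        rw [hcon] at h1'
        have : all' = all := h1'
        rw [this] at hxall'
        exact hxa hxall'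
      -- B cannot be out of fuel
      cases fuelB with
      | zero => exact absurd (pv_length_le apps hnd hsub) (by omega)
      | succ m =>
        -- reduce both programs one step
        have hstepA : pvLoopA apps (n+1) all imp
            = pvLoopA apps n all' (pvGetImplied all' apps) := by
          simp [pvLoopA, hsup, hall']
        have hround : pvRound apps all fr = (all', new) := by
          unfold pvRound
          rw [pvRound_spec, ← h1']
          simp [hnew]
        have hstepB : pvLoopB apps (m+1) all fr = pvLoopB apps m all' new := by
          simp only [pvLoopB, hfrne, if_false, hround]
        rw [hstepA, hstepB]
        -- re-establish the invariants
        have hndall' : all'.Nodup := by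
          rw [hall']; exact PySem.Set.nodup_update all imp hnd
        have hsub' : ∀ y ∈ all', y ∈ pvU apps := by
          intro y hy
          rw [h1'] at hy
          rcases (pv_mem_roundU apps all fr y).1 hy with hys | ⟨d, _, hyd⟩
          · exact hsub y hys
          · exact pvI_subset_U apps hyd
        have habs : pvRoundU apps all' all = all' := by
          apply pvRoundU_absorb
          intro d hd y hy
          exact h3 d hd y hy
        have hchain : PySem.Set.update all' (pvGetImplied all' apps)
            = pvRoundU apps all' all' := by
          rw [pvGetImplied_eq', pvRoundU_eq_update apps all' PySem.Set.empty,
            show PySem.Set.update PySem.Set.empty (all'.flatMap (pvI apps))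
              = PySem.Set.ofList (all'.flatMap (pvI apps)) from PySem.Set.update_nil_left _,
            pv_update_ofList, ← pvRoundU_eq_update]
        have h1'' : PySem.Set.update all' (pvGetImplied all' apps) = pvRoundU apps all' new := by
          rw [hchain]
          conv_lhs => rw [hsplit]
          rw [pvRoundU_append, ← hsplit, habs]
        have h3'' : ∀ d ∈ all', ∀ y ∈ pvI apps d,
            y ∈ PySem.Set.update all' (pvGetImplied all' apps) := by
          intro d hd y hy
          rw [hchain, pv_mem_roundU]
          right
          exact ⟨d, hd, hy⟩
        have hlen : all.length < all'.length := by
          have hpos : 0 < new.length := List.length_pos_of_ne_nil hnewne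
          rw [hsplit, List.length_append]
          omega
        exact ih m all' (pvGetImplied all' apps) new hndall' hsub' h1'' h3''
          (by omega) (by omega)

-- ===== VERDICT (by name: the statement is the Claim_ definition above) =====
theorem get_implied_apps_py_spec : Claim_equal_get_implied_apps_py := by
  intro detected_apps apps1 _
  show get_implied_apps_py detected_apps apps1 = get_implied_apps_py_alt detected_apps apps1
  unfold get_implied_apps_py get_implied_apps_py_alt
  have hW : (apps1.flatMap (fun p => p.2.flatMap (fun q => q.2))).length = (pvU apps1).length := rfl
  rw [hW]
  apply pvMain apps1 ((pvU apps1).length + 1) ((pvU apps1).length + 2)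
    PySem.Set.empty (pvGetImplied detected_apps apps1) detected_apps
  · exact List.nodup_nil
  · intro x hx; exact absurd hx (List.not_mem_nil)
  · rw [pvGetImplied_eq', pvRoundU_eq_update apps1 detected_apps PySem.Set.empty]
    show PySem.Set.update [] (PySem.Set.update [] (detected_apps.flatMap (pvI apps1)))
        = PySem.Set.update [] (detected_apps.flatMap (pvI apps1))
    rw [PySem.Set.update_nil_left, PySem.Set.update_nil_left, PySem.Set.ofList_ofList]
  · intro d hd; exact absurd hd (List.not_mem_nil)
  · simp
  · simp
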